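-- pv_equiv track=rewrite | github.com/riju-talk/college | college(IIITD)/Assignment RND/Assignnment-2/3.py | sig_count
-- ===== SOURCE A (Python) =====
-- def sig_count(dic):
--     sg_count=[]
--     for i,j in dic.items():
--         count_of_signatures=0
--         for k,l in j.items():
--             count_of_signatures+=l
--         sg_count.append(count_of_signatures)
--     maxx=0
--     for i in sg_count:
--         if(maxx<i):
--             maxx=i
--         else:
--             maxx=maxx
--     ls=[]
--     for i in range(len(sg_count)):
--         if(maxx==sg_count[i]):
--             ls.append(i)
--     return ls
-- ===== SOURCE B (Python) =====
-- def sig_count(dic):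
--     maxx = 0
--     ls = []
--     for i, inner in enumerate(dic.values()):
--         s = sum(inner.values())
--         if s > maxx:
--             maxx = s
--             ls = [i]
--         elif s == maxx:
--             ls.append(i)
--     return ls
-- ===== Notes on version B (the rewrite author's own statement) =====
-- stated objective: alternative
-- what changed: B replaces A's three passes (build a sums list, scan it for the max, scan it again for matching indices) by a single pass that maintains the running max and the list of winning indices together, resetting the list on a new max; no sums list is materialized.
import Mathlib
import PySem

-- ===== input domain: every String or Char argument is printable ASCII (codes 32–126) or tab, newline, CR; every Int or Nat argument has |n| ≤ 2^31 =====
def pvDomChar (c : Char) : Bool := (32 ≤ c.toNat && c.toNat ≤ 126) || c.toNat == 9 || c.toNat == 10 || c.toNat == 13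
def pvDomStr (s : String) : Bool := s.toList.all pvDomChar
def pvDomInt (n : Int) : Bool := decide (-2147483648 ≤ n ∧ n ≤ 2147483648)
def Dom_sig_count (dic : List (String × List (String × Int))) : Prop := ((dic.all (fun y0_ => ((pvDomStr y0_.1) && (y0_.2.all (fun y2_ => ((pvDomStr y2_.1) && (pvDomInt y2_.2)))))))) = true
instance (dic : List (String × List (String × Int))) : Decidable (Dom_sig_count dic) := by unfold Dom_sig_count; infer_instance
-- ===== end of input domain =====

-- B fuses A's three passes into one pass keeping the running max and winning-index list together (objective: alternative decomposition, same cost).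

-- ===== PORT A =====
-- literal port: build the sums list, scan for the max (floor 0), then collect indices.
-- sg_count[i] is read with pyGetD (default 0): i ranges over range(len(sg_count)), always in range, so this is exact.
def sig_count (dic : List (String × List (String × Int))) : List Int :=
  let sg_count : List Int :=
    dic.foldl (fun acc ij => acc ++ [ij.2.foldl (fun c kl => c + kl.2) 0]) []
  let maxx : Int := sg_count.foldl (fun m i => if m < i then i else m) 0
  (PySem.List.pyRange 0 (sg_count.length : Int) 1).foldl
    (fun ls i => if maxx == PySem.List.pyGetD sg_count i 0 then ls ++ [i] else ls) []

-- ===== PORT B =====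
-- single pass over enumerate(dic.values()): state = (running max, indices attaining it)
def sig_count_alt (dic : List (String × List (String × Int))) : List Int :=
  ((PySem.List.enumerate dic 0).foldl
    (fun st p =>
      let s := p.2.2.foldl (fun c kl => c + kl.2) 0
      if st.1 < s then (s, [p.1])
      else if s == st.1 then (st.1, st.2 ++ [p.1])
      else st)
    ((0 : Int), ([] : List Int))).2

-- ===== PRECONDITION & SPEC =====
def Spec_sig_count (dic : List (String × List (String × Int))) (out : List Int) : Prop := out = sig_count_alt dic
instance (dic : List (String × List (String × Int))) (out : List Int) : Decidable (Spec_sig_count dic out) := by unfold Spec_sig_count; infer_instance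

-- ===== CLAIM (what is proved, stated in full; the proofs are below) =====
def Claim_equal_sig_count : Prop := ∀ (dic : List (String × List (String × Int))), Dom_sig_count dic → Spec_sig_count dic (sig_count dic)

-- ===== LEMMAS AND PROOFS =====

-- the per-entry sum
def pvSum (j : List (String × Int)) : Int := j.foldl (fun c kl => c + kl.2) 0

-- A's max step
def pvStep (m i : Int) : Int := if m < i then i else m

-- A's index-collecting fold, over enumerated sums
def pvCollect (v : Int) (l : List (Int × Int)) (acc : List Int) : List Int :=
  l.foldl (fun ls p => if v == p.2 then ls ++ [p.1] else ls) acc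

-- the body of A after its first loop, as a function of the sums list (defeq to sig_count's tail)
def pvACore (sg : List Int) : List Int :=
  (PySem.List.pyRange 0 (sg.length : Int) 1).foldl
    (fun ls i => if (sg.foldl (fun m i => if m < i then i else m) 0) == PySem.List.pyGetD sg i 0 then ls ++ [i] else ls) []

lemma pvCollect_acc (v : Int) (l : List (Int × Int)) (acc : List Int) :
    pvCollect v l acc = acc ++ pvCollect v l [] := by
  induction l generalizing acc with
  | nil => simp [pvCollect]
  | cons p t ih =>
      by_cases hc : v = p.2
      · rw [show pvCollect v (p :: t) acc = pvCollect v t (acc ++ [p.1]) by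
            simp [pvCollect, hc]]
        rw [show pvCollect v (p :: t) [] = pvCollect v t [p.1] by
            simp [pvCollect, hc]]
        rw [ih (acc ++ [p.1]), ih [p.1]]
        simp
      · rw [show pvCollect v (p :: t) acc = pvCollect v t acc by
            simp [pvCollect, hc]]
        rw [show pvCollect v (p :: t) [] = pvCollect v t [] by
            simp [pvCollect, hc]]
        exact ih acc

lemma pvCollect_cons (v : Int) (p : Int × Int) (t : List (Int × Int)) :
    pvCollect v (p :: t) [] = (if v = p.2 then [p.1] else []) ++ pvCollect v t [] := by
  by_cases hc : v = p.2
  · rw [show pvCollect v (p :: t) [] = pvCollect v t [p.1] by simp [pvCollect, hc]]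
    rw [pvCollect_acc]
    simp [hc]
  · rw [show pvCollect v (p :: t) [] = pvCollect v t [] by simp [pvCollect, hc]]
    simp [hc]

lemma le_foldl_pvStep (xs : List Int) (m : Int) : m ≤ xs.foldl pvStep m := by
  induction xs generalizing m with
  | nil => simp
  | cons x t ih =>
      simp only [List.foldl_cons]
      refine le_trans ?_ (ih (pvStep m x))
      unfold pvStep; split <;> omega

-- main invariant of B's single pass
lemma pvMain (xs : List Int) (s m : Int) (ls : List Int) :
    (PySem.List.enumerate xs s).foldl
      (fun st p => if st.1 < p.2 then (p.2, [p.1])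
        else if p.2 == st.1 then (st.1, st.2 ++ [p.1]) else st) (m, ls)
    = (xs.foldl pvStep m,
       (if xs.foldl pvStep m = m then ls else []) ++
         pvCollect (xs.foldl pvStep m) (PySem.List.enumerate xs s) []) := by
  induction xs generalizing s m ls with
  | nil => simp [PySem.List.enumerate_nil, pvCollect]
  | cons x t ih =>
      rw [PySem.List.enumerate_cons]
      simp only [List.foldl_cons]
      by_cases h1 : m < x
      · have hstep : pvStep m x = x := by simp [pvStep, h1]
        rw [if_pos h1, ih (s + 1) x [s]]
        simp only [hstep]
        have hxle : x ≤ t.foldl pvStep x := le_foldl_pvStep t x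
        have hMne : ¬ t.foldl pvStep x = m := by omega
        rw [if_neg hMne, pvCollect_cons]
        by_cases hx : t.foldl pvStep x = x
        · simp [hx]
        · simp [hx]
      · have hstep : pvStep m x = m := by simp [pvStep, h1]
        rw [if_neg h1]
        have hmle : m ≤ t.foldl pvStep m := le_foldl_pvStep t m
        by_cases h2 : x = m
        · rw [if_pos (by simp [h2]), ih (s + 1) m (ls ++ [s])]
          simp only [hstep]
          rw [pvCollect_cons]
          by_cases hMm : t.foldl pvStep m = m
          · simp [hMm, h2]
          · have hne : ¬ t.foldl pvStep m = x := fun h => hMm (h.trans h2)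
            simp [hMm, hne]
        · rw [if_neg (by simp [h2]), ih (s + 1) m ls]
          simp only [hstep]
          rw [pvCollect_cons]
          have hxlt : x < m := lt_of_le_of_ne (not_lt.mp h1) h2
          have hne : ¬ t.foldl pvStep m = x := by omega
          simp [hne]

-- enumerate commutes with map on the values
lemma pvEnumerate_map {α β : Type} (g : α → β) (xs : List α) (s : Int) :
    PySem.List.enumerate (xs.map g) s
      = (PySem.List.enumerate xs s).map (fun p => (p.1, g p.2)) := by
  induction xs generalizing s with
  | nil => simp [PySem.List.enumerate_nil]
  | cons x t ih => simp [PySem.List.enumerate_cons, ih]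

-- A's second and third loop = pvCollect of the enumerated sums
lemma pvA_char (sg : List Int) :
    pvACore sg = pvCollect (sg.foldl pvStep 0) (PySem.List.enumerate sg 0) [] := by
  unfold pvACore pvCollect
  rw [PySem.List.enumerate_eq_map_pyRange (d := 0), List.foldl_map]
  simp only [PySem.List.len_eq]
  rfl

-- ===== VERDICT (by name: the statement is the Claim_ definition above) =====
theorem sig_count_spec : Claim_equal_sig_count := by
  intro dic _
  unfold Spec_sig_count
  have hsg : dic.foldl (fun acc ij => acc ++ [ij.2.foldl (fun c kl => c + kl.2) 0]) []
      = dic.map (fun ij => pvSum ij.2) := by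
    simpa [pvSum] using
      PySem.List.foldl_append_singleton_eq_map (l := dic)
        (f := fun ij => pvSum ij.2) (acc := [])
  have hA : sig_count dic
      = pvCollect ((dic.map (fun ij => pvSum ij.2)).foldl pvStep 0)
          (PySem.List.enumerate (dic.map (fun ij => pvSum ij.2)) 0) [] := by
    have h0 : sig_count dic
        = pvACore (dic.foldl (fun acc ij => acc ++ [ij.2.foldl (fun c kl => c + kl.2) 0]) []) := rfl
    rw [h0, hsg, pvA_char]
  have hB : sig_count_alt dic
      = ((PySem.List.enumerate (dic.map (fun ij => pvSum ij.2)) 0).foldl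
          (fun st p => if st.1 < p.2 then (p.2, [p.1])
            else if p.2 == st.1 then (st.1, st.2 ++ [p.1]) else st)
          ((0 : Int), ([] : List Int))).2 := by
    unfold sig_count_alt
    rw [pvEnumerate_map, List.foldl_map]
    rfl
  rw [hA, hB, pvMain]
  split <;> simp
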